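-- pv_equiv track=rewrite | github.com/BingqiangZhou/DailyDigest | core/report_generator.py | _insert_tldr
-- ===== SOURCE A (Python) =====
-- def _insert_tldr(content, tldr, language):
--     """将 TL;DR 插入报告头部（标题之后、正文之前）"""
--     lines = content.split("\n")
--     # 找到第一个 ## 或 --- 的位置，在它之前插入 TL;DR
--     insert_idx = 0
--     for i, line in enumerate(lines):
--         stripped = line.strip()
--         if stripped.startswith("## ") or stripped == "---":
--             insert_idx = i
--             break
--         if stripped.startswith("> "):
--             insert_idx = i + 1
--     # Safety: never insert before the # title line
--     if insert_idx == 0: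
--         insert_idx = 1
--
--     tldr_label = "## 📌 TL;DR"
--     # Wrap TL;DR bullets as blockquote callout
--     tldr_lines = tldr.strip().split("\n")
--     tldr_blockquote = "\n".join(f"> {line}" for line in tldr_lines)
--     tldr_block = [tldr_label, "", tldr_blockquote, "", "---", ""]
--
--     new_lines = lines[:insert_idx] + tldr_block + lines[insert_idx:]
--     return "\n".join(new_lines)
-- ===== SOURCE B (Python) =====
-- def _insert_tldr(content, tldr, language):
--     """Insert TL;DR after the title: two separate searches instead of one combined scan."""
--     lines = content.split("\n")
--     # First search: index of the first header / horizontal rule, if any.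
--     insert_idx = next(
--         (i for i, line in enumerate(lines)
--          if line.strip().startswith("## ") or line.strip() == "---"),
--         None,
--     )
--     if insert_idx is None:
--         # Second search: one past the last blockquote line, 0 if there is none.
--         bq_indices = [i for i, line in enumerate(lines) if line.strip().startswith("> ")]
--         insert_idx = bq_indices[-1] + 1 if bq_indices else 0
--     # Safety: never insert before the # title line
--     if insert_idx == 0:
--         insert_idx = 1
--
--     tldr_label = "## 📌 TL;DR"
--     tldr_lines = tldr.strip().split("\n")
--     tldr_blockquote = "\n".join("> " + line for line in tldr_lines)
--     tldr_block = [tldr_label, "", tldr_blockquote, "", "---", ""]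
--     return "\n".join(lines[:insert_idx] + tldr_block + lines[insert_idx:])
-- ===== Notes on version B (the rewrite author's own statement) =====
-- stated objective: simpler
-- what changed: Replaces A's single stateful break-and-track loop with two independent searches: first-header index via next() over a generator, and only if absent a list of blockquote indices whose last element+1 is used; formatting and splice unchanged.
import Mathlib
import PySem

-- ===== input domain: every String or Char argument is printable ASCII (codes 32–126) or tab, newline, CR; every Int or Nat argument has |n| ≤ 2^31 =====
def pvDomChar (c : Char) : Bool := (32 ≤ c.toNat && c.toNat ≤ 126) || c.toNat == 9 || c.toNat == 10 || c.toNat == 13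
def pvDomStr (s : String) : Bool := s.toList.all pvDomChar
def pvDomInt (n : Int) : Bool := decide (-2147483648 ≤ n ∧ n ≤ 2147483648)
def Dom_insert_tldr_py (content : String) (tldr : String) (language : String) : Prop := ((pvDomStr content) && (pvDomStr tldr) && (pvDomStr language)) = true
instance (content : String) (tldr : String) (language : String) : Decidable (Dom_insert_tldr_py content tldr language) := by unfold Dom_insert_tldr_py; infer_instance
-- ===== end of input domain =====

-- B replaces A's single break-and-track loop by two independent searches (first header, else last blockquote); objective: simpler decomposition, same cost.

-- line.strip().startswith("## ") or line.strip() == "---"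
def pvIsHeader (l : String) : Bool :=
  PySem.Str.startswith (PySem.Str.strip l) "## " || PySem.Str.strip l == "---"
-- line.strip().startswith("> ")
def pvIsBq (l : String) : Bool := PySem.Str.startswith (PySem.Str.strip l) "> "

-- ===== PORT A =====
-- A's loop: break on the first header/hr, else keep tracking last-blockquote+1 in the accumulator
def pvAScan : List String → Int → Int → Int
  | [], _, acc => acc
  | l :: rest, i, acc =>
    if pvIsHeader l then i
    else if pvIsBq l then pvAScan rest (i + 1) (i + 1)
    else pvAScan rest (i + 1) acc

def insert_tldr_py (content : String) (tldr : String) (language : String) : String :=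
  let lines := (PySem.Str.split? content "\n").getD []  -- sep "\n" ≠ "": split? is some, exact
  let insert_idx := pvAScan lines 0 0
  let insert_idx := if insert_idx == 0 then 1 else insert_idx
  let tldr_label := "## 📌 TL;DR"
  let tldr_lines := (PySem.Str.split? (PySem.Str.strip tldr) "\n").getD []
  let tldr_blockquote := PySem.Str.join "\n" (tldr_lines.map (fun line => "> " ++ line))
  let tldr_block := [tldr_label, "", tldr_blockquote, "", "---", ""]
  let new_lines := PySem.List.slice lines none (some insert_idx) ++ tldr_block ++
                   PySem.List.slice lines (some insert_idx) none
  PySem.Str.join "\n" new_lines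

-- ===== PORT B =====
def insert_tldr_py_alt (content : String) (tldr : String) (language : String) : String :=
  let lines := (PySem.Str.split? content "\n").getD []  -- sep "\n" ≠ "": split? is some, exact
  let first_header := (PySem.List.enumerate lines).find? (fun p => pvIsHeader p.2)
  let insert_idx : Int :=
    match first_header with
    | some p => p.1
    | none =>
      let bq_indices := ((PySem.List.enumerate lines).filter (fun p => pvIsBq p.2)).map (·.1)
      match bq_indices.getLast? with
      | some j => j + 1
      | none => 0
  let insert_idx := if insert_idx == 0 then 1 else insert_idx
  let tldr_label := "## 📌 TL;DR"
  let tldr_lines := (PySem.Str.split? (PySem.Str.strip tldr) "\n").getD []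
  let tldr_blockquote := PySem.Str.join "\n" (tldr_lines.map (fun line => "> " ++ line))
  let tldr_block := [tldr_label, "", tldr_blockquote, "", "---", ""]
  PySem.Str.join "\n" (PySem.List.slice lines none (some insert_idx) ++ tldr_block ++
                       PySem.List.slice lines (some insert_idx) none)

-- ===== PRECONDITION & SPEC =====
def Spec_insert_tldr_py (content : String) (tldr : String) (language : String) (out : String) : Prop := out = insert_tldr_py_alt content tldr language
instance (content : String) (tldr : String) (language : String) (out : String) : Decidable (Spec_insert_tldr_py content tldr language out) := by unfold Spec_insert_tldr_py; infer_instance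

-- ===== CLAIM (what is proved, stated in full; the proofs are below) =====
def Claim_equal_insert_tldr_py : Prop := ∀ (content : String) (tldr : String) (language : String), Dom_insert_tldr_py content tldr language → Spec_insert_tldr_py content tldr language (insert_tldr_py content tldr language)

-- ===== LEMMAS AND PROOFS =====

-- A's combined scan equals B's two-search composition, for any start index and accumulator.
theorem pvAScan_eq (ls : List String) : ∀ (i acc : Int),
    pvAScan ls i acc =
      match (PySem.List.enumerate ls i).find? (fun p => pvIsHeader p.2) with
      | some p => p.1
      | none =>
        match (((PySem.List.enumerate ls i).filter (fun p => pvIsBq p.2)).map (·.1)).getLast? with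
        | some j => j + 1
        | none => acc := by
  induction ls with
  | nil => intro i acc; simp [pvAScan, PySem.List.enumerate]
  | cons l rest ih =>
    intro i acc
    rw [PySem.List.enumerate_cons]
    by_cases hH : pvIsHeader l
    · simp [pvAScan, hH, List.find?]
    · rw [List.find?_cons_of_neg (by simp [hH])]
      by_cases hB : pvIsBq l
      · rw [show pvAScan (l :: rest) i acc = pvAScan rest (i + 1) (i + 1) from by
              simp [pvAScan, hH, hB],
            ih, List.filter_cons_of_pos (by simp [hB]), List.map_cons]
        cases hfind : (PySem.List.enumerate rest (i + 1)).find? (fun p => pvIsHeader p.2) with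
        | some p => rfl
        | none =>
          cases hlast : ((((PySem.List.enumerate rest (i + 1)).filter
              (fun p => pvIsBq p.2)).map (·.1))).getLast? with
          | some j => simp [List.getLast?_cons, hlast]
          | none => simp [List.getLast?_cons, hlast]
      · rw [show pvAScan (l :: rest) i acc = pvAScan rest (i + 1) acc from by
              simp [pvAScan, hH, hB],
            ih, List.filter_cons_of_neg (by simp [hB])]

-- ===== VERDICT (by name: the statement is the Claim_ definition above) =====
theorem insert_tldr_py_spec : Claim_equal_insert_tldr_py := by
  intro content tldr language _
  show insert_tldr_py content tldr language = insert_tldr_py_alt content tldr language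
  simp only [insert_tldr_py, insert_tldr_py_alt, pvAScan_eq]
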